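-- pv_equiv track=rewrite | github.com/ingrid-nagell/workspace | python_bootcamp/boot39_APIs_capstone_flight_finder/flight_search.py | cheapest_flight
-- ===== SOURCE A (Python) =====
-- def cheapest_flight(data, max_price):
--     lowest_price = max_price
--     cheapest_flight = {}
--     for flight in data:
--         if flight["price"] < lowest_price:
--             cheapest_flight = flight
--             lowest_price = flight["price"]
--     return cheapest_flight
-- ===== SOURCE B (Python) =====
-- def cheapest_flight(data, max_price):
--     for flight in sorted(data, key=lambda f: f["price"]):
--         if flight["price"] < max_price:
--             return flight
--     return {}
-- ===== Notes on version B (the rewrite author's own statement) =====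
-- stated objective: alternative
-- what changed: B stably sorts the flights by price and returns the first one strictly below max_price (stability preserves A's first-seen tie-break), instead of A's running-minimum scan.
import Mathlib
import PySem

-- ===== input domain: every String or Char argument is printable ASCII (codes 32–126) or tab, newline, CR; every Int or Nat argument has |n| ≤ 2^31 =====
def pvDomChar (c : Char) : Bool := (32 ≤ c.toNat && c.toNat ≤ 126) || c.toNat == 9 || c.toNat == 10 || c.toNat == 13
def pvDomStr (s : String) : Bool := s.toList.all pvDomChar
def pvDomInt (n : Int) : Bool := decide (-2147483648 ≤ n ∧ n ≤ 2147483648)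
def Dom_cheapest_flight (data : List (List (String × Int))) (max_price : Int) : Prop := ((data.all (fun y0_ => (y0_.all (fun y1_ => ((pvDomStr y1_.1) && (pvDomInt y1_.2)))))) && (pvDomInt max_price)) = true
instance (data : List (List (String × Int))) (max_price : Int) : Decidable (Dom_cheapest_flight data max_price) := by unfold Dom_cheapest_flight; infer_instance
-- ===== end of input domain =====

-- B replaces A's running-minimum scan with a stable sort by price followed by taking the
-- first flight strictly below max_price; same value everywhere A returns (alternative, not faster).

-- flight["price"]: first-match lookup in the association list (Python dict access);
-- under Pre_ the key is present, so the `.getD 0` default is never the result.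
def pvPrice (f : List (String × Int)) : Int :=
  ((f.find? (fun kv => kv.1 == "price")).map Prod.snd).getD 0

-- ===== PORT A =====
def cheapest_flight (data : List (List (String × Int))) (max_price : Int) : List (String × Int) :=
  (data.foldl
    (fun st f => if pvPrice f < st.1 then (pvPrice f, f) else st)
    (max_price, ([] : List (String × Int)))).2

-- ===== PORT B =====
def cheapest_flight_alt (data : List (List (String × Int))) (max_price : Int) : List (String × Int) :=
  ((PySem.List.sorted data pvPrice false).find? (fun f => decide (pvPrice f < max_price))).getD []

-- ===== PRECONDITION & SPEC =====
-- Pre_ excludes exactly the inputs where some flight has no "price" key: there Python A raises KeyError.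
def Pre_cheapest_flight (data : List (List (String × Int))) (max_price : Int) : Prop :=
  ∀ f ∈ data, (f.find? (fun kv => kv.1 == "price")).isSome = true
instance (data : List (List (String × Int))) (max_price : Int) : Decidable (Pre_cheapest_flight data max_price) := by unfold Pre_cheapest_flight; infer_instance

def pvWitness_cheapest_flight : (List (List (String × Int))) × Int :=
  ([[("price", 5), ("id", 1)], [("price", 3), ("id", 2)]], 10)

def Spec_cheapest_flight (data : List (List (String × Int))) (max_price : Int) (out : List (String × Int)) : Prop := out = cheapest_flight_alt data max_price
instance (data : List (List (String × Int))) (max_price : Int) (out : List (String × Int)) : Decidable (Spec_cheapest_flight data max_price out) := by unfold Spec_cheapest_flight; infer_instance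

-- ===== CLAIM (what is proved, stated in full; the proofs are below) =====
def Claim_equal_cheapest_flight : Prop := ∀ (data : List (List (String × Int))) (max_price : Int), Dom_cheapest_flight data max_price → Pre_cheapest_flight data max_price → Spec_cheapest_flight data max_price (cheapest_flight data max_price)

-- ===== LEMMAS AND PROOFS =====

-- the running-minimum step on a pure element (no price accumulator)
def pvMinf (a b : List (String × Int)) : List (String × Int) :=
  if pvPrice b < pvPrice a then b else a

-- A's loop step
def pvStep (st : Int × List (String × Int)) (f : List (String × Int)) : Int × List (String × Int) :=
  if pvPrice f < st.1 then (pvPrice f, f) else st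

lemma pvPrice_foldl_minf_le (l : List (List (String × Int))) (s : List (String × Int)) :
    pvPrice (l.foldl pvMinf s) ≤ pvPrice s := by
  induction l generalizing s with
  | nil => simp
  | cons x t ih =>
    simp only [List.foldl_cons, pvMinf]
    split
    · exact le_trans (ih x) (le_of_lt (by assumption))
    · exact ih s

lemma pvMinf_aux (l : List (List (String × Int))) (a b : List (String × Int))
    (hab : pvPrice a ≤ pvPrice b) :
    l.foldl pvMinf a =
      if pvPrice (l.foldl pvMinf b) < pvPrice a then l.foldl pvMinf b else a := by
  induction l generalizing a b with
  | nil =>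
    simp only [List.foldl_nil]
    rw [if_neg (not_lt.mpr hab)]
  | cons x t ih =>
    simp only [List.foldl_cons, pvMinf]
    by_cases hxa : pvPrice x < pvPrice a
    · rw [if_pos hxa, if_pos (lt_of_lt_of_le hxa hab)]
      rw [if_pos (lt_of_le_of_lt (pvPrice_foldl_minf_le t x) hxa)]
    · rw [if_neg hxa]
      by_cases hxb : pvPrice x < pvPrice b
      · rw [if_pos hxb]
        exact ih a x (not_lt.mp hxa)
      · rw [if_neg hxb]
        exact ih a b hab

lemma pvStep_foldl (t : List (List (String × Int))) (h : List (String × Int)) :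
    t.foldl pvStep (pvPrice h, h) = (pvPrice (t.foldl pvMinf h), t.foldl pvMinf h) := by
  induction t generalizing h with
  | nil => simp
  | cons x t ih =>
    simp only [List.foldl_cons, pvStep, pvMinf]
    by_cases hx : pvPrice x < pvPrice h
    · rw [if_pos hx, if_pos hx]; exact ih x
    · rw [if_neg hx, if_neg hx]; exact ih h

-- characterization of A's loop
lemma pvA_char (data : List (List (String × Int))) (m : Int) :
    cheapest_flight data m =
      match data with
      | [] => []
      | x :: t => if pvPrice (t.foldl pvMinf x) < m then t.foldl pvMinf x else [] := by
  induction data generalizing m with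
  | nil => rfl
  | cons x t ih =>
    show (List.foldl pvStep (pvStep (m, []) x) t).2 = _
    simp only [pvStep]
    by_cases hx : pvPrice x < m
    · rw [if_pos hx, pvStep_foldl]
      have : pvPrice (t.foldl pvMinf x) < m :=
        lt_of_le_of_lt (pvPrice_foldl_minf_le t x) hx
      simp [this]
    · rw [if_neg hx]
      have ht := ih m
      show cheapest_flight t m = _
      rw [ht]
      cases t with
      | nil => simp [hx]
      | cons y t' =>
        simp only [List.foldl_cons, pvMinf]
        by_cases hyx : pvPrice y < pvPrice x
        · rw [if_pos hyx]
        · rw [if_neg hyx]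
          rw [pvMinf_aux t' x y (not_lt.mp hyx)]
          by_cases hlt : pvPrice (t'.foldl pvMinf y) < pvPrice x
          · rw [if_pos hlt]
          · rw [if_neg hlt]
            have h1 : ¬ pvPrice (t'.foldl pvMinf y) < m :=
              not_lt.mpr (le_trans (le_trans (not_lt.mp hx) (not_lt.mp hlt)) (le_refl _))
            rw [if_neg h1, if_neg hx]

-- head of the insertion-sort fold
lemma pvHead_foldl_ins (t : List (List (String × Int))) (h : List (String × Int))
    (rest : List (List (String × Int))) :
    ∃ rest', t.foldl
        (fun acc x => PySem.List.insertBy (fun a b => decide (pvPrice a < pvPrice b)) x acc)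
        (h :: rest)
      = (t.foldl pvMinf h) :: rest' := by
  induction t generalizing h rest with
  | nil => exact ⟨rest, rfl⟩
  | cons z t ih =>
    simp only [List.foldl_cons, PySem.List.insertBy, pvMinf]
    by_cases hz : pvPrice z < pvPrice h
    · rw [if_pos (by simpa using hz), if_pos hz]
      exact ih z (h :: rest)
    · rw [if_neg (by simpa using hz), if_neg hz]
      exact ih h _

lemma pvSorted_cons (x : List (String × Int)) (t : List (List (String × Int))) :
    ∃ rest', PySem.List.sorted (x :: t) pvPrice false = (t.foldl pvMinf x) :: rest' := by
  rw [PySem.List.sorted_eq_foldl_insertBy]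
  simpa [List.foldl_cons, PySem.List.insertBy] using pvHead_foldl_ins t x []

-- characterization of B
lemma pvB_char (data : List (List (String × Int))) (m : Int) :
    cheapest_flight_alt data m =
      match data with
      | [] => []
      | x :: t => if pvPrice (t.foldl pvMinf x) < m then t.foldl pvMinf x else [] := by
  cases data with
  | nil => rfl
  | cons x t =>
    obtain ⟨rest', hs⟩ := pvSorted_cons x t
    unfold cheapest_flight_alt
    rw [hs]
    show _ = if pvPrice (t.foldl pvMinf x) < m then t.foldl pvMinf x else []
    by_cases hm : pvPrice (t.foldl pvMinf x) < m
    · rw [if_pos hm]; simp [hm]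
    · rw [if_neg hm]
      have hnone : ((t.foldl pvMinf x) :: rest').find? (fun f => decide (pvPrice f < m)) = none := by
        apply List.find?_eq_none.mpr
        intro y hy
        have hy' : y ∈ PySem.List.sorted (x :: t) pvPrice false := by rw [hs]; exact hy
        have hle : pvPrice (t.foldl pvMinf x) ≤ pvPrice y :=
          PySem.List.key_head_sorted_le (x :: t) pvPrice hs y
            ((PySem.List.mem_sorted _ _ _ _).mp hy')
        simp only [decide_eq_true_eq]
        exact not_lt.mpr (le_trans (not_lt.mp hm) hle)
      rw [hnone]; rfl

-- ===== VERDICT (by name: the statement is the Claim_ definition above) =====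
theorem cheapest_flight_spec : Claim_equal_cheapest_flight := by
  intro data m _hdom _hpre
  show cheapest_flight data m = cheapest_flight_alt data m
  rw [pvA_char, pvB_char]
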